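-- pv_equiv track=rewrite | github.com/shobhit-srg/Wikipedia-Search-engine | wiki_indexer.py | Num_punch_removal
-- ===== SOURCE A (Python) =====
-- import string
--
-- def Num_punch_removal(wordlist):
--   fr=0
--   res=[]
--   for wrd in wordlist:
--     s = ""
--     for w1 in wrd:
--       if w1 in set(["0", "1", "2", "3", "4", "5", "6", "7", "8", "9"]):
--         fr=fr+1
--         continue
--       if w1 in set(list(string.punctuation) + ['\n', '\t', " "]):
--         if len(s) and s.isalpha():
--             res.append(s)
--         s = ""
--         continue
--       s += w1
--     if len(s) and s.isalpha():
--       res.append(s)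
--   return res
-- ===== SOURCE B (Python) =====
-- import string
--
-- # delete digits, turn every punctuation char / '\n' / '\t' into a space
-- _TBL = str.maketrans(string.punctuation + "\n\t", " " * (len(string.punctuation) + 2), "0123456789")
--
-- def Num_punch_removal(wordlist):
--     return [tok
--             for wrd in wordlist
--             for tok in wrd.translate(_TBL).split(' ')
--             if tok and tok.isalpha()]
-- ===== Notes on version B (the rewrite author's own statement) =====
-- stated objective: faster
-- what changed: Replaced the char-by-char accumulator state machine with a per-word pipeline: one str.translate that deletes digits and maps punctuation/'\n'/'\t' to spaces, then split(' ') and a filter keeping non-empty alphabetic tokens.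
import Mathlib
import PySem

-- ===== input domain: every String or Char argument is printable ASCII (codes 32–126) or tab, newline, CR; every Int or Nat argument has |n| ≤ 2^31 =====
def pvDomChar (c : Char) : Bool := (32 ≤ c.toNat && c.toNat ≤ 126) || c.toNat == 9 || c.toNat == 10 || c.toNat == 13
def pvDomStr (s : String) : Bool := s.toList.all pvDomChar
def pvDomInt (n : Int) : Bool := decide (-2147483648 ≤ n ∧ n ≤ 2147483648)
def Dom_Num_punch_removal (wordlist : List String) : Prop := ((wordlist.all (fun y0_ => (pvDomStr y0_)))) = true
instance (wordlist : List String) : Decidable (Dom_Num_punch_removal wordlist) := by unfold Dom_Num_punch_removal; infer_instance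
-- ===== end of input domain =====

-- B replaces A's char-by-char accumulator state machine by a per-word
-- delete-digits / map-separators-to-space / split-on-space / filter pipeline (objective: faster; measured faster in a timing run).

-- ===== PORT A =====
def pvDigitsA : List Char := ['0', '1', '2', '3', '4', '5', '6', '7', '8', '9']
-- set(list(string.punctuation) + ['\n', '\t', ' '])
def pvSepsA : List Char := "!\"#$%&'()*+,-./:;<=>?@[\\]^_`{|}~".toList ++ ['\n', '\t', ' ']

-- the body of A's inner `for w1 in wrd` loop; state = (fr, s, res)
def pvStepA (st : Int × List Char × List String) (c : Char) : Int × List Char × List String :=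
  let (fr, s, res) := st
  if c ∈ pvDigitsA then (fr + 1, s, res)
  else if c ∈ pvSepsA then
    (fr, [], if s.length ≠ 0 ∧ PySem.Chars.strIsalpha s then res ++ [String.mk s] else res)
  else (fr, s ++ [c], res)

-- the body of A's outer `for wrd in wordlist` loop; state = (fr, res)
def pvWordA (st : Int × List String) (wrd : String) : Int × List String :=
  let (fr, res) := st
  let (fr', s, res') := wrd.toList.foldl pvStepA (fr, [], res)
  (fr', if s.length ≠ 0 ∧ PySem.Chars.strIsalpha s then res' ++ [String.mk s] else res')

def Num_punch_removal (wordlist : List String) : List String :=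
  (wordlist.foldl pvWordA (0, [])).2

-- ===== PORT B =====
def pvDelB : List Char := "0123456789".toList
def pvToSpaceB : List Char := "!\"#$%&'()*+,-./:;<=>?@[\\]^_`{|}~\n\t".toList

-- wrd.translate(_TBL): delete digits, map punctuation/'\n'/'\t' to ' ', keep the rest
def pvTransB (c : Char) : Option Char :=
  if c ∈ pvDelB then none else if c ∈ pvToSpaceB then some ' ' else some c

-- hand port of str.split(' ') (single-char separator): exact Python semantics,
-- "".split(' ') = [''] and consecutive separators yield empty pieces
def pvSplitSp : List Char → List (List Char)
  | [] => [[]]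
  | c :: cs =>
    if c = ' ' then [] :: pvSplitSp cs
    else
      match pvSplitSp cs with
      | t :: ts => (c :: t) :: ts
      | [] => [[c]]

-- `tok and tok.isalpha()`
def pvGoodB (t : List Char) : Bool := decide (t ≠ []) && PySem.Chars.strIsalpha t

def Num_punch_removal_alt (wordlist : List String) : List String :=
  wordlist.flatMap fun wrd =>
    ((pvSplitSp (wrd.toList.filterMap pvTransB)).filter pvGoodB).map String.mk

-- ===== PRECONDITION & SPEC =====
def Spec_Num_punch_removal (wordlist : List String) (out : List String) : Prop := out = Num_punch_removal_alt wordlist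
instance (wordlist : List String) (out : List String) : Decidable (Spec_Num_punch_removal wordlist out) := by unfold Spec_Num_punch_removal; infer_instance

-- ===== CLAIM (what is proved, stated in full; the proofs are below) =====
def Claim_equal_Num_punch_removal : Prop := ∀ (wordlist : List String), Dom_Num_punch_removal wordlist → Spec_Num_punch_removal wordlist (Num_punch_removal wordlist)

-- ===== LEMMAS AND PROOFS =====

lemma pvDigits_eq : pvDigitsA = pvDelB := by decide

lemma pvSeps_eq : pvSepsA = pvToSpaceB ++ [' '] := by decide

lemma pvMem_seps (c : Char) : c ∈ pvSepsA ↔ c ∈ pvToSpaceB ∨ c = ' ' := by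
  rw [pvSeps_eq]; simp

lemma pvSplitSp_ne_nil (l : List Char) : pvSplitSp l ≠ [] := by
  cases l with
  | nil => simp [pvSplitSp]
  | cons c cs =>
    simp only [pvSplitSp]
    split
    · simp
    · cases h : pvSplitSp cs <;> simp

lemma pvSplitSp_prepend (s r : List Char) (hs : ∀ c ∈ s, c ≠ ' ') :
    pvSplitSp (s ++ r) = (s ++ (pvSplitSp r).headI) :: (pvSplitSp r).tail := by
  induction s with
  | nil =>
    simp only [List.nil_append, List.headI]
    cases h : pvSplitSp r with
    | nil => exact absurd h (pvSplitSp_ne_nil r)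
    | cons t ts => simp
  | cons c s ih =>
    have hc : c ≠ ' ' := hs c (by simp)
    have ih' := ih (fun x hx => hs x (by simp [hx]))
    simp only [List.cons_append, pvSplitSp, if_neg hc, ih']

lemma pvSplitSp_sep (s r : List Char) (hs : ∀ c ∈ s, c ≠ ' ') :
    pvSplitSp (s ++ ' ' :: r) = s :: pvSplitSp r := by
  rw [pvSplitSp_prepend s (' ' :: r) hs]
  simp [pvSplitSp]

-- per-word tokens of B
def pvTokB (wrd : List Char) : List String :=
  ((pvSplitSp (wrd.filterMap pvTransB)).filter pvGoodB).map String.mk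

-- A's end-of-word flush
def pvFinishA (s : List Char) (res : List String) : List String :=
  if s.length ≠ 0 ∧ PySem.Chars.strIsalpha s then res ++ [String.mk s] else res

-- the inner loop starting from space-free accumulator s equals B's pipeline on s ++ clean l
lemma pvInner (l : List Char) (fr : Int) (s : List Char) (res : List String)
    (hs : ∀ c ∈ s, c ≠ ' ') :
    pvFinishA (l.foldl pvStepA (fr, s, res)).2.1 (l.foldl pvStepA (fr, s, res)).2.2 =
      res ++ ((pvSplitSp (s ++ l.filterMap pvTransB)).filter pvGoodB).map String.mk := by
  induction l generalizing fr s res with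
  | nil =>
    simp only [List.foldl_nil, List.filterMap_nil]
    rw [pvSplitSp_prepend s [] hs]
    simp only [pvSplitSp, List.headI, List.tail, List.append_nil]
    unfold pvFinishA pvGoodB
    by_cases h : s.length ≠ 0 ∧ PySem.Chars.strIsalpha s
    · have h1 : s ≠ [] := by intro hn; simp [hn] at h
      simp [h, List.filter, h1]
    · rw [if_neg h]
      rcases Decidable.not_and_iff_or_not.mp h with h' | h'
      · have : s = [] := by simpa using not_not.mp h'
        simp [this, List.filter]
      · simp only [Bool.not_eq_true] at h'
        by_cases hnil : s = []
        · simp [hnil, List.filter]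
        · simp [List.filter, hnil, h']
  | cons c l ih =>
    simp only [List.foldl_cons, List.filterMap_cons]
    by_cases hd : c ∈ pvDigitsA
    · have hdB : pvTransB c = none := by
        unfold pvTransB
        rw [if_pos (pvDigits_eq ▸ hd)]
      simp only [pvStepA, if_pos hd, hdB]
      exact ih (fr + 1) s res hs
    · by_cases hsep : c ∈ pvSepsA
      · have hdB : c ∉ pvDelB := pvDigits_eq ▸ hd
        have hB : pvTransB c = some ' ' := by
          unfold pvTransB
          rw [if_neg hdB]
          rcases (pvMem_seps c).mp hsep with h | h
          · rw [if_pos h]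
          · subst h; split <;> rfl
        simp only [pvStepA, if_neg hd, if_pos hsep, hB]
        rw [ih fr []
          (if s.length ≠ 0 ∧ PySem.Chars.strIsalpha s then res ++ [String.mk s] else res)
          (by simp)]
        rw [pvSplitSp_sep s _ hs]
        simp only [List.filter, List.nil_append]
        by_cases h : s.length ≠ 0 ∧ PySem.Chars.strIsalpha s
        · have h1 : s ≠ [] := by intro hn; simp [hn] at h
          simp [h, h1, pvGoodB]
        · rw [if_neg h]
          rcases Decidable.not_and_iff_or_not.mp h with h' | h'
          · have : s = [] := by simpa using not_not.mp h'
            simp [this, pvGoodB]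
          · simp only [Bool.not_eq_true] at h'
            by_cases hnil : s = []
            · simp [hnil, pvGoodB]
            · simp [pvGoodB, hnil, h']
      · have hdB : c ∉ pvDelB := pvDigits_eq ▸ hd
        have hmB : c ∉ pvToSpaceB := fun h => hsep ((pvMem_seps c).mpr (Or.inl h))
        have hB : pvTransB c = some c := by
          unfold pvTransB; rw [if_neg hdB, if_neg hmB]
        have hc : c ≠ ' ' := fun h => hsep ((pvMem_seps c).mpr (Or.inr h))
        simp only [pvStepA, if_neg hd, if_neg hsep, hB]
        have hs' : ∀ x ∈ s ++ [c], x ≠ ' ' := by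
          intro x hx
          rcases List.mem_append.mp hx with h | h
          · exact hs x h
          · simp at h; subst h; exact hc
        have := ih fr (s ++ [c]) res hs'
        rwa [List.append_assoc, List.singleton_append] at this

lemma pvOuter (wl : List String) (fr : Int) (res : List String) :
    (wl.foldl pvWordA (fr, res)).2 = res ++ wl.flatMap (fun w => pvTokB w.toList) := by
  induction wl generalizing fr res with
  | nil => simp
  | cons w ws ih =>
    simp only [List.foldl_cons, List.flatMap_cons]
    have hw : pvWordA (fr, res) w =
        ((w.toList.foldl pvStepA (fr, [], res)).1, res ++ pvTokB w.toList) := by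
      have h2 := pvInner w.toList fr [] res (by simp)
      unfold pvWordA
      rcases h : w.toList.foldl pvStepA (fr, [], res) with ⟨fr', s', res'⟩
      rw [h] at h2
      simp only [pvFinishA, List.nil_append] at h2
      simp only [h, h2, pvTokB]
    rw [hw, ih]
    simp [pvTokB]

-- ===== VERDICT (by name: the statement is the Claim_ definition above) =====
theorem Num_punch_removal_spec : Claim_equal_Num_punch_removal := by
  intro wl _
  unfold Spec_Num_punch_removal Num_punch_removal Num_punch_removal_alt
  rw [pvOuter wl 0 []]
  simp [pvTokB]
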